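-- pv_equiv track=rewrite | github.com/stefano-marchesin/SAFIR | code/models/neu_baselines/gensim_utils.py | get_pos2term
-- ===== SOURCE A (Python) =====
-- def get_pos2term(text):
-- 	"""split text into terms and return {pos: [term, ["__NULL__"]]}"""
-- 	pos2term = {}
-- 	terms = text.split()  # split on whitespaces as text has been already pre processed
-- 	# set text index
-- 	index = text.index
-- 	running_offset = 0
-- 	# loop over terms
-- 	for term in terms:
-- 		term_offset = index(term, running_offset)
-- 		term_len = len(term)
-- 		# update running offset
-- 		running_offset = term_offset + term_len
-- 		pos2term[term_offset] = [term, "__NULL__"]  # note: "__NULL__" is for later use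
-- 	return pos2term
-- ===== SOURCE B (Python) =====
-- def get_pos2term(text):
-- 	"""split text into terms and return {pos: [term, ["__NULL__"]]}"""
-- 	pos2term = {}
-- 	n = len(text)
-- 	i = 0
-- 	while i < n:
-- 		if text[i].isspace():
-- 			i += 1
-- 		else:
-- 			j = i
-- 			while j < n and not text[j].isspace():
-- 				j += 1
-- 			pos2term[i] = [text[i:j], "__NULL__"]
-- 			i = j
-- 	return pos2term
-- ===== Notes on version B (the rewrite author's own statement) =====
-- stated objective: alternative
-- what changed: B replaces A's text.split() plus per-term text.index() re-scanning with a single direct index scan over the string that finds each token and its start offset in one pass.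
import Mathlib
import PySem

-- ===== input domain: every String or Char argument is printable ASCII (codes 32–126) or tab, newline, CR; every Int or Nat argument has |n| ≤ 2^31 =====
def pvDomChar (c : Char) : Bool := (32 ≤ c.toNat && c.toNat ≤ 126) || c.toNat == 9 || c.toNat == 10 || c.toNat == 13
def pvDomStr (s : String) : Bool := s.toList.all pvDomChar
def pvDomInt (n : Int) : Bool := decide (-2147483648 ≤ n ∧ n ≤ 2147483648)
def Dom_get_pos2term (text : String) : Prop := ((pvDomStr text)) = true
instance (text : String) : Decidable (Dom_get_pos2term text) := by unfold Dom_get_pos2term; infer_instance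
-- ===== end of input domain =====

-- B replaces A's split()+index() re-scanning with a single direct index scan that finds each
-- token and its start offset in one pass (objective: alternative decomposition, same cost class).

-- ===== PORT A =====
-- text.index(term, running_offset) is ported as PySem.Str.findFrom (Python's ValueError branch,
-- find = -1, is never reached because every term of text.split() occurs in text at or after the
-- running offset — proved below).
def get_pos2term (text : String) : List (Int × List String) :=
  let terms := PySem.Str.split₀ text
  (terms.foldl
      (fun st term =>
        let term_offset := PySem.Str.findFrom text term st.2
        let term_len := PySem.Str.len term
        (st.1.insert term_offset [term, "__NULL__"], term_offset + term_len))
      ((PySem.Dict.empty : PySem.Dict Int (List String)), (0 : Int))).1.items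

-- ===== PORT B =====
-- Source B's two while loops, translated with an explicit fuel argument (fuel only makes the
-- loops structurally terminating; n - start is always enough). Indices are in-bounds Nats
-- (the j < n guard mirrors the while condition), so text[j] is pyGetD with an unused default.
def altScanEnd (s : List Char) (n : Nat) : Nat → Nat → Nat
  | 0, j => j
  | fuel + 1, j =>
    if j < n ∧ ¬ PySem.Chars.isspace (PySem.List.pyGetD s (j : Int) ' ') then
      altScanEnd s n fuel (j + 1)
    else j

def altLoop (s : List Char) (n : Nat) :
    Nat → Nat → PySem.Dict Int (List String) → PySem.Dict Int (List String)
  | 0, _, acc => acc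
  | fuel + 1, i, acc =>
    if i < n then
      if PySem.Chars.isspace (PySem.List.pyGetD s (i : Int) ' ') then
        altLoop s n fuel (i + 1) acc
      else
        let j := altScanEnd s n (n - i) i
        altLoop s n fuel j
          (acc.insert (i : Int)
            [String.ofList (PySem.List.slice s (some (i : Int)) (some (j : Int))), "__NULL__"])
    else acc

def get_pos2term_alt (text : String) : List (Int × List String) :=
  (altLoop text.toList text.toList.length text.toList.length 0 PySem.Dict.empty).items

-- ===== PRECONDITION & SPEC =====
def Spec_get_pos2term (text : String) (out : List (Int × List String)) : Prop := out = get_pos2term_alt text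
instance (text : String) (out : List (Int × List String)) : Decidable (Spec_get_pos2term text out) := by unfold Spec_get_pos2term; infer_instance

-- ===== CLAIM (what is proved, stated in full; the proofs are below) =====
def Claim_equal_get_pos2term : Prop := ∀ (text : String), Dom_get_pos2term text → Spec_get_pos2term text (get_pos2term text)

-- ===== LEMMAS AND PROOFS =====

-- A's fold step, named so the main induction can talk about it
def stepA (text : String) (st : PySem.Dict Int (List String) × Int) (term : String) :
    PySem.Dict Int (List String) × Int :=
  (st.1.insert (PySem.Str.findFrom text term st.2) [term, "__NULL__"],
   PySem.Str.findFrom text term st.2 + PySem.Str.len term)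

theorem get_pos2term_eq (text : String) :
    get_pos2term text =
      ((PySem.Str.split₀ text).foldl (stepA text)
        ((PySem.Dict.empty : PySem.Dict Int (List String)), (0 : Int))).1.items := rfl

-- altScanEnd computes the end of the non-whitespace run starting at j
theorem altScanEnd_spec (s : List Char) :
    ∀ (fuel j : Nat), s.length - j ≤ fuel →
    altScanEnd s s.length fuel j =
      j + ((s.drop j).takeWhile (fun c => !PySem.Chars.isspace c)).length := by
  intro fuel
  induction fuel with
  | zero =>
    intro j hj
    rw [altScanEnd, List.drop_of_length_le (by omega)]
    simp
  | succ fuel ih =>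
    intro j hj
    by_cases hcond : j < s.length ∧
        ¬ PySem.Chars.isspace (PySem.List.pyGetD s (j : Int) ' ')
    · have hlt : j < s.length := hcond.1
      have hg : PySem.List.pyGetD s (j : Int) ' ' = s[j] := by
        rw [PySem.List.pyGetD_natCast]; exact List.getD_eq_getElem _ _ hlt
      have hws : ¬ PySem.Chars.isspace s[j] = true := by rw [← hg]; exact hcond.2
      rw [altScanEnd, if_pos hcond, ih (j + 1) (by omega)]
      rw [List.drop_eq_getElem_cons hlt, List.takeWhile_cons_of_pos (by simpa using hws)]
      simp; omega
    · rw [altScanEnd, if_neg hcond]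
      rcases Nat.lt_or_ge j s.length with hlt | hge
      · have hg : PySem.List.pyGetD s (j : Int) ' ' = s[j] := by
          rw [PySem.List.pyGetD_natCast]; exact List.getD_eq_getElem _ _ hlt
        have hws : PySem.Chars.isspace s[j] = true := by
          by_contra hcc
          exact hcond ⟨hlt, by rw [hg]; exact hcc⟩
        rw [List.drop_eq_getElem_cons hlt, List.takeWhile_cons_of_neg (by simpa using hws)]
        simp
      · rw [List.drop_of_length_le hge]; simp

-- ---- structure of PySem.Chars.split₀ ----

theorem split₀_nil : PySem.Chars.split₀ [] = [] := rfl

theorem split₀_go_acc (s : List Char) :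
    ∀ cur acc, PySem.Chars.split₀.go s cur acc =
      acc.reverse ++ PySem.Chars.split₀.go s cur [] := by
  induction s with
  | nil =>
    intro cur acc
    simp only [PySem.Chars.split₀.go]
    by_cases h : cur.isEmpty <;> simp [h]
  | cons c t ih =>
    intro cur acc
    by_cases hsp : PySem.Chars.isspace c
    · by_cases hcur : cur = []
      · subst hcur
        simp only [PySem.Chars.split₀.go, hsp, List.isEmpty_nil]
        exact ih [] acc
      · have hie : cur.isEmpty = false := by simp [hcur]
        simp only [PySem.Chars.split₀.go, hsp, hie]
        simp only [Bool.false_eq_true, if_false]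
        rw [ih [] (cur.reverse :: acc), ih [] [cur.reverse]]
        simp
    · simp only [PySem.Chars.split₀.go, hsp]
      simp only [Bool.false_eq_true, if_false]
      exact ih (c :: cur) acc

theorem split₀_cons_space (c : Char) (t : List Char) (hc : PySem.Chars.isspace c) :
    PySem.Chars.split₀ (c :: t) = PySem.Chars.split₀ t := by
  simp [PySem.Chars.split₀, PySem.Chars.split₀.go, hc]

theorem split₀_go_nil_cur (cur : List Char) (acc : List (List Char)) (h : cur ≠ []) :
    PySem.Chars.split₀.go [] cur acc = (cur.reverse :: acc).reverse := by
  simp [PySem.Chars.split₀.go, h]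

theorem split₀_go_cons_space_cur (c : Char) (t cur : List Char) (acc : List (List Char))
    (hc : PySem.Chars.isspace c) (h : cur ≠ []) :
    PySem.Chars.split₀.go (c :: t) cur acc =
      PySem.Chars.split₀.go t [] (cur.reverse :: acc) := by
  have hie : cur.isEmpty = false := by simp [h]
  simp [PySem.Chars.split₀.go, hc, hie]

theorem split₀_go_token (rest : List Char) :
    ∀ tok, (∀ c ∈ tok, ¬ PySem.Chars.isspace c) →
      ∀ cur acc, PySem.Chars.split₀.go (tok ++ rest) cur acc =
        PySem.Chars.split₀.go rest (tok.reverse ++ cur) acc := by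
  intro tok
  induction tok with
  | nil => intro _ cur acc; simp
  | cons c t ih =>
    intro hws cur acc
    have hc : ¬ PySem.Chars.isspace c := hws c (by simp)
    simp only [List.cons_append, PySem.Chars.split₀.go, hc]
    simp only [Bool.false_eq_true, if_false]
    rw [ih (fun x hx => hws x (by simp [hx])) (c :: cur) acc]
    simp

theorem split₀_token (tok rest : List Char) (h1 : tok ≠ [])
    (h2 : ∀ c ∈ tok, ¬ PySem.Chars.isspace c)
    (h3 : rest = [] ∨ ∃ c t, rest = c :: t ∧ PySem.Chars.isspace c) :
    PySem.Chars.split₀ (tok ++ rest) = tok :: PySem.Chars.split₀ rest := by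
  have hrev : tok.reverse ≠ [] := by simpa using h1
  rw [PySem.Chars.split₀, split₀_go_token rest tok h2 [] [], List.append_nil]
  rcases h3 with rfl | ⟨c, t, rfl, hc⟩
  · rw [split₀_go_nil_cur _ _ hrev, split₀_nil]
    simp
  · rw [split₀_go_cons_space_cur c t _ _ hc hrev,
      split₀_go_acc t [] [tok.reverse.reverse], split₀_cons_space c t hc]
    simp [PySem.Chars.split₀]

-- ---- first occurrence of a token after whitespace ----

theorem find_go_token (tok v : List Char) (h1 : tok ≠ [])
    (h2 : ∀ c ∈ tok, ¬ PySem.Chars.isspace c) :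
    ∀ u m, (∀ c ∈ u, PySem.Chars.isspace c) →
      PySem.Chars.find.go tok (u ++ (tok ++ v)) m = (m : Int) + u.length := by
  intro u
  induction u with
  | nil =>
    intro m _
    obtain ⟨c0, t0, rfl⟩ := List.exists_cons_of_ne_nil h1
    simp only [List.nil_append, List.cons_append, PySem.Chars.find.go]
    rw [if_pos (by simp [List.isPrefixOf_iff_prefix])]
    simp
  | cons a u ih =>
    intro m hws
    have ha : PySem.Chars.isspace a := hws a (by simp)
    obtain ⟨c0, t0, rfl⟩ := List.exists_cons_of_ne_nil h1
    have hc : ¬ PySem.Chars.isspace c0 := h2 c0 (by simp)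
    have hnp : ¬ ((c0 :: t0).isPrefixOf (a :: (u ++ c0 :: (t0 ++ v))) = true) := by
      intro hp
      rw [List.isPrefixOf_iff_prefix] at hp
      exact hc ((List.cons_prefix_cons.mp hp).1 ▸ ha)
    simp only [List.cons_append] at ih ⊢
    simp only [PySem.Chars.find.go]
    rw [if_neg hnp, ih (m + 1) (fun x hx => hws x (List.mem_cons_of_mem a hx))]
    push_cast [List.length_cons]; ring

theorem findFrom_token (s tok v u : List Char) (off k : Nat)
    (hoffk : off ≤ k) (hk : k ≤ s.length)
    (hdropoff : s.drop off = u ++ (tok ++ v))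
    (hu : ∀ c ∈ u, PySem.Chars.isspace c) (hulen : u.length = k - off)
    (h1 : tok ≠ []) (h2 : ∀ c ∈ tok, ¬ PySem.Chars.isspace c) :
    PySem.Chars.findFrom s tok (off : Int) none = (k : Int) := by
  have hoff : off ≤ s.length := le_trans hoffk hk
  rw [PySem.Chars.findFrom_natCast s tok off hoff, hdropoff]
  have hfind : PySem.Chars.find (u ++ (tok ++ v)) tok = (u.length : Int) := by
    simpa using find_go_token tok v h1 h2 u 0 hu
  rw [hfind, if_neg (by omega)]
  omega

-- the main loop invariant: folding A's step over the tokens of the unprocessed suffix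
-- (with only whitespace between the running offset and the suffix start) equals B's scan
theorem main_loop (text : String) :
    ∀ (fuel k off : Nat) (d : PySem.Dict Int (List String)),
      text.toList.length - k ≤ fuel → k ≤ text.toList.length → off ≤ k →
      (∀ c ∈ (text.toList.take k).drop off, PySem.Chars.isspace c) →
      ((PySem.Chars.split₀ (text.toList.drop k)).foldl
          (fun st tokC => stepA text st (String.ofList tokC)) (d, (off : Int))).1
        = altLoop text.toList text.toList.length fuel k d := by
  intro fuel
  induction fuel with
  | zero =>
    intro k off d hfuel hk hoff hws
    have hkn : k = text.toList.length := by omega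
    subst hkn
    rw [List.drop_length, split₀_nil, List.foldl_nil, altLoop]
  | succ fuel ih =>
    intro k off d hfuel hk hoff hws
    rcases Nat.lt_or_ge k text.toList.length with hklt | hgen
    · have hget : PySem.List.pyGetD text.toList (k : Int) ' ' = text.toList[k] := by
        rw [PySem.List.pyGetD_natCast]; exact List.getD_eq_getElem _ _ hklt
      by_cases hc : PySem.Chars.isspace text.toList[k]
      · -- whitespace at k: skip it on both sides
        rw [List.drop_eq_getElem_cons hklt, split₀_cons_space _ _ hc]
        rw [ih (k + 1) off d (by omega) (by omega) (by omega) ?_]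
        · conv_rhs => rw [altLoop]
          rw [if_pos hklt, if_pos (by rw [hget]; exact hc)]
        · intro c hcmem
          rw [List.take_add_one, List.getElem?_eq_getElem hklt] at hcmem
          rw [List.drop_append_of_le_length
                (by rw [List.length_take]; omega)] at hcmem
          rcases List.mem_append.mp hcmem with hmem | hmem
          · exact hws c hmem
          · simp at hmem; rw [hmem]; exact hc
      · -- token starts at k
        have htokrest : text.toList.drop k =
            (text.toList.drop k).takeWhile (fun c => !PySem.Chars.isspace c) ++
            (text.toList.drop k).dropWhile (fun c => !PySem.Chars.isspace c) :=
          (List.takeWhile_append_dropWhile).symm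
        set tok := (text.toList.drop k).takeWhile (fun c => !PySem.Chars.isspace c) with htokdef
        set rest := (text.toList.drop k).dropWhile (fun c => !PySem.Chars.isspace c) with hrestdef
        have htoknil : tok ≠ [] := by
          rw [htokdef, List.drop_eq_getElem_cons hklt,
            List.takeWhile_cons_of_pos (by simpa using hc)]
          simp
        have htokws : ∀ c ∈ tok, ¬ PySem.Chars.isspace c := by
          intro c hm
          have := List.mem_takeWhile_imp hm
          simpa using this
        have hrest : rest = [] ∨ ∃ c t, rest = c :: t ∧ PySem.Chars.isspace c := by
          rcases hr : rest with _ | ⟨c, t⟩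
          · exact Or.inl rfl
          · refine Or.inr ⟨c, t, rfl, ?_⟩
            have hne : (text.toList.drop k).dropWhile (fun c => !PySem.Chars.isspace c) ≠ [] := by
              rw [← hrestdef, hr]; simp
            have := List.head_dropWhile_not (fun c => !PySem.Chars.isspace c) hne
            simp only [← hrestdef, hr, List.head_cons] at this
            simpa using this
        have htlen : tok.length ≤ text.toList.length - k := by
          have h1 := (List.takeWhile_prefix (l := text.toList.drop k)
            (p := fun c => !PySem.Chars.isspace c)).length_le
          rw [← htokdef, List.length_drop] at h1
          exact h1
        have htpos : 0 < tok.length := List.length_pos_iff.mpr htoknil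
        have hdropoff : text.toList.drop off =
            ((text.toList.take k).drop off) ++ (tok ++ rest) := by
          conv_lhs => rw [← List.take_append_drop k text.toList]
          rw [List.drop_append_of_le_length (by rw [List.length_take]; omega)]
          rw [htokrest]
        have hfind : PySem.Chars.findFrom text.toList tok (off : Int) none = (k : Int) :=
          findFrom_token text.toList tok rest ((text.toList.take k).drop off) off k hoff
            (le_of_lt hklt) hdropoff hws
            (by rw [List.length_drop, List.length_take]; omega) htoknil htokws
        have hstep : stepA text (d, (off : Int)) (String.ofList tok) =
            (d.insert (k : Int) [String.ofList tok, "__NULL__"],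
             ((k + tok.length : Nat) : Int)) := by
          simp [stepA, PySem.Str.findFrom, PySem.Str.len, hfind]
        have hdroprest : text.toList.drop (k + tok.length) = rest := by
          rw [← List.drop_drop, htokrest, List.drop_left]
        rw [htokrest, split₀_token tok rest htoknil htokws hrest, List.foldl_cons, hstep]
        rw [← hdroprest]
        rw [ih (k + tok.length) (k + tok.length) _ (by omega) (by omega) (le_refl _)
          (by rw [List.drop_of_length_le (by rw [List.length_take]; omega)]; simp)]
        have hscan : altScanEnd text.toList text.toList.length
            (text.toList.length - k) k = k + tok.length := by
          rw [altScanEnd_spec text.toList _ k (le_refl _), htokdef]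
        have hslice : PySem.List.slice text.toList (some (k : Int))
            (some ((k + tok.length : Nat) : Int)) = tok := by
          rw [PySem.List.slice_natCast, Nat.add_sub_cancel_left, htokrest]
          exact List.take_left
        conv_rhs => rw [altLoop]
        rw [if_pos hklt, if_neg (by rw [hget]; exact hc)]
        simp only [hscan, hslice]
    · have hkn : k = text.toList.length := by omega
      subst hkn
      rw [List.drop_length, split₀_nil, List.foldl_nil]
      conv_rhs => rw [altLoop]
      rw [if_neg (lt_irrefl _)]

-- ===== VERDICT (by name: the statement is the Claim_ definition above) =====
theorem get_pos2term_spec : Claim_equal_get_pos2term := by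
  intro text _
  unfold Spec_get_pos2term
  rw [get_pos2term_eq]
  have hsplit : PySem.Str.split₀ text = (PySem.Chars.split₀ text.toList).map String.ofList := rfl
  rw [hsplit, List.foldl_map, get_pos2term_alt]
  congr 1
  have hm := main_loop text text.toList.length 0 0 PySem.Dict.empty
    (by omega) (by omega) (by omega) (by simp)
  simpa using hm
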